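-- pv_equiv track=rewrite | github.com/Gangoo91/Elec-Mate-Merge | services/elec-pipeline/src/scrapers/outreach/shared.py | prefer_generic_email
-- ===== SOURCE A (Python) =====
-- PREFERRED_PREFIXES = (
--     "enquiries@", "info@", "contact@", "hello@", "admin@",
--     "courses@", "apprenticeships@", "training@", "reception@",
-- )
--
-- def prefer_generic_email(emails: list[str], domain: str | None = None) -> str | None:
--     if not emails:
--         return None
--     pool = emails
--     if domain:
--         on_domain = [e for e in emails if e.endswith("@" + domain.lower())]
--         if on_domain:
--             pool = on_domain
--     for prefix in PREFERRED_PREFIXES: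
--         for e in pool:
--             if e.startswith(prefix):
--                 return e
--     return pool[0]
-- ===== SOURCE B (Python) =====
-- PREFERRED_PREFIXES = (
--     "enquiries@", "info@", "contact@", "hello@", "admin@",
--     "courses@", "apprenticeships@", "training@", "reception@",
-- )
--
-- def prefer_generic_email(emails: list[str], domain: str | None = None) -> str | None:
--     if not emails:
--         return None
--     pool = emails
--     if domain:
--         on_domain = [e for e in emails if e.endswith("@" + domain.lower())]
--         if on_domain:
--             pool = on_domain
--     sentinel = len(PREFERRED_PREFIXES)
--     def rank(e):
--         return next((i for i, p in enumerate(PREFERRED_PREFIXES) if e.startswith(p)), sentinel)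
--     return min(pool, key=rank)
-- ===== Notes on version B (the rewrite author's own statement) =====
-- stated objective: idiomatic
-- what changed: Replaces A's prefix-outer/email-inner nested early-return scan by computing a per-email priority rank (index of the first preferred prefix it starts with, sentinel len(PREFERRED_PREFIXES) if none) and taking a single stable min(pool, key=rank).
import Mathlib
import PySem

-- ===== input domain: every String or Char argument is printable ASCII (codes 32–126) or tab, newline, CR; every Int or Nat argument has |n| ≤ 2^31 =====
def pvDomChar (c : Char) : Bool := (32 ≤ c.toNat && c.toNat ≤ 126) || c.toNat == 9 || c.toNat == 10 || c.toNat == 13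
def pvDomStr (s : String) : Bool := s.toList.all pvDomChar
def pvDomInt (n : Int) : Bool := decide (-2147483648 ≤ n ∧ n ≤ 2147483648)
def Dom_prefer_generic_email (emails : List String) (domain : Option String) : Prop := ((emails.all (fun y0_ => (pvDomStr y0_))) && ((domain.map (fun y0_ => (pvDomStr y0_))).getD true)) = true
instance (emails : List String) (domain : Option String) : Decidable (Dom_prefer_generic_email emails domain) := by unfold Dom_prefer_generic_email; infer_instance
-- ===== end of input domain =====

-- B replaces A's prefix-outer/email-inner nested early-return scan by a per-element
-- priority key (index of the first matching preferred prefix) and one stable min pass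
-- (objective: idiomatic; same linear cost).

def PREFERRED_PREFIXES : List String :=
  ["enquiries@", "info@", "contact@", "hello@", "admin@",
   "courses@", "apprenticeships@", "training@", "reception@"]

-- shared by both Pythons verbatim: '' check, domain filter, on_domain fallback
def pvPool (emails : List String) (domain : Option String) : List String :=
  match domain with
  | none => emails
  | some d =>
    if d.toList = [] then emails   -- 'if domain:' — empty string is falsy
    else
      let on_domain := emails.filter
        (fun e => PySem.Chars.endswith e.toList ('@' :: PySem.Chars.lower d.toList))
      if on_domain.isEmpty then emails else on_domain

-- ===== PORT A =====
-- 'for prefix in PREFERRED_PREFIXES: for e in pool: if e.startswith(prefix): return e'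
def prefA : List String → List String → Option String
  | [], _ => none
  | p :: t, pool =>
    match pool.find? (fun e => PySem.Str.startswith e p) with
    | some e => some e
    | none => prefA t pool

def prefer_generic_email (emails : List String) (domain : Option String) : Option String :=
  if emails.isEmpty then none
  else
    let pool := pvPool emails domain
    match prefA PREFERRED_PREFIXES pool with
    | some e => some e
    | none => PySem.List.pyGet? pool 0   -- 'return pool[0]' (pool is nonempty here)

-- ===== PORT B =====
-- rank(e) = index of the first preferred prefix e starts with, else len(PREFERRED_PREFIXES)
def rankB : List String → String → Nat
  | [], _ => 0
  | p :: t, e => if PySem.Str.startswith e p then 0 else rankB t e + 1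

def prefer_generic_email_alt (emails : List String) (domain : Option String) : Option String :=
  if emails.isEmpty then none
  else PySem.List.min? (pvPool emails domain) (rankB PREFERRED_PREFIXES)

-- ===== PRECONDITION & SPEC =====
def Spec_prefer_generic_email (emails : List String) (domain : Option String) (out : Option String) : Prop := out = prefer_generic_email_alt emails domain
instance (emails : List String) (domain : Option String) (out : Option String) : Decidable (Spec_prefer_generic_email emails domain out) := by unfold Spec_prefer_generic_email; infer_instance

-- ===== CLAIM (what is proved, stated in full; the proofs are below) =====
def Claim_equal_prefer_generic_email : Prop := ∀ (emails : List String) (domain : Option String), Dom_prefer_generic_email emails domain → Spec_prefer_generic_email emails domain (prefer_generic_email emails domain)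

-- ===== LEMMAS AND PROOFS =====

-- the step of PySem.List.min?
def pvStep (key : String → Nat) (acc : Option String) (x : String) : Option String :=
  match acc with
  | none => some x
  | some m => if key x < key m then some x else some m

lemma min?_eq_foldl_step (l : List String) (key : String → Nat) :
    PySem.List.min? l key = l.foldl (pvStep key) none := by
  simp only [PySem.List.min?]
  congr 1
  funext acc x
  cases acc <;> rfl

lemma foldl_step_keep (key : String → Nat) (l : List String) (m : String)
    (h : ∀ x ∈ l, key m ≤ key x) : l.foldl (pvStep key) (some m) = some m := by
  induction l with
  | nil => rfl
  | cons x t ih =>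
    have hx : ¬ key x < key m := not_lt.mpr (h x (by simp))
    simp only [List.foldl_cons, pvStep, if_neg hx]
    exact ih (fun y hy => h y (by simp [hy]))

lemma foldl_step_first (key : String → Nat) (e : String) :
    ∀ (l1 : List String) (m : String) (l2 : List String),
      (∀ x ∈ l1, key e < key x) → key e < key m → (∀ x ∈ l2, key e ≤ key x) →
      (l1 ++ e :: l2).foldl (pvStep key) (some m) = some e := by
  intro l1
  induction l1 with
  | nil =>
    intro m l2 _ hm h2
    simp only [List.nil_append, List.foldl_cons, pvStep, if_pos hm]
    exact foldl_step_keep key l2 e h2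
  | cons x t ih =>
    intro m l2 h1 hm h2
    have hx : key e < key x := h1 x (by simp)
    simp only [List.cons_append, List.foldl_cons, pvStep]
    split <;> exact ih _ l2 (fun y hy => h1 y (by simp [hy])) (by assumption) h2

-- min? returns the FIRST element with minimal key
lemma min?_first (key : String → Nat) (l1 : List String) (e : String) (l2 : List String)
    (h1 : ∀ x ∈ l1, key e < key x) (h2 : ∀ x ∈ l2, key e ≤ key x) :
    PySem.List.min? (l1 ++ e :: l2) key = some e := by
  rw [min?_eq_foldl_step]
  cases l1 with
  | nil =>
    simp only [List.nil_append, List.foldl_cons, pvStep]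
    exact foldl_step_keep key l2 e h2
  | cons x t =>
    have hx : key e < key x := h1 x (by simp)
    simp only [List.cons_append, List.foldl_cons, pvStep]
    exact foldl_step_first key e t x l2 (fun y hy => h1 y (by simp [hy])) hx h2

-- min? only reads the key on members of the list (and the running minimum, a member)
lemma foldl_step_congr (k1 k2 : String → Nat) :
    ∀ (l : List String) (acc : Option String),
      (∀ x ∈ l, k1 x = k2 x) → (∀ m, acc = some m → k1 m = k2 m) →
      l.foldl (pvStep k1) acc = l.foldl (pvStep k2) acc := by
  intro l
  induction l with
  | nil => intro acc _ _; rfl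
  | cons x t ih =>
    intro acc h hacc
    have hx : k1 x = k2 x := h x (by simp)
    have hstep : pvStep k1 acc x = pvStep k2 acc x := by
      cases acc with
      | none => rfl
      | some m => simp [pvStep, hx, hacc m rfl]
    rw [List.foldl_cons, List.foldl_cons, hstep]
    refine ih _ (fun y hy => h y (by simp [hy])) ?_
    intro m hm
    cases acc with
    | none =>
      simp only [pvStep] at hm
      injection hm with h'
      exact h' ▸ hx
    | some m0 =>
      simp only [pvStep] at hm
      split at hm <;> injection hm with h'
      · exact h' ▸ hx
      · exact h' ▸ hacc m0 rfl

lemma min?_congr_mem (l : List String) (k1 k2 : String → Nat)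
    (h : ∀ x ∈ l, k1 x = k2 x) : PySem.List.min? l k1 = PySem.List.min? l k2 := by
  rw [min?_eq_foldl_step, min?_eq_foldl_step]
  exact foldl_step_congr k1 k2 l none h (by intro m hm; cases hm)

-- shifting every key by 1 does not change which element is minimal
lemma min?_shift (l : List String) (f : String → Nat) :
    PySem.List.min? l (fun x => f x + 1) = PySem.List.min? l f := by
  rw [min?_eq_foldl_step, min?_eq_foldl_step]
  have : pvStep (fun x => f x + 1) = pvStep f := by
    funext acc x
    cases acc with
    | none => rfl
    | some m => simp [pvStep]
  rw [this]

-- the heart: A's nested scan with pool[0] fallback = stable min by rank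
lemma loop_eq_min (ps : List String) (pool : List String) (hp : pool ≠ []) :
    (match prefA ps pool with
     | some e => some e
     | none => PySem.List.pyGet? pool 0) = PySem.List.min? pool (rankB ps) := by
  induction ps with
  | nil =>
    obtain ⟨h0, t0, rfl⟩ : ∃ h t, pool = h :: t := by
      cases pool with | nil => exact absurd rfl hp | cons h t => exact ⟨h, t, rfl⟩
    have : PySem.List.min? (h0 :: t0) (rankB []) = some h0 :=
      min?_first (rankB []) [] h0 t0 (by simp) (by intro x _; exact Nat.le_refl _)
    simp only [prefA, this, PySem.List.pyGet?_zero_cons]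
  | cons p t ih =>
    simp only [prefA]
    cases hf : pool.find? (fun e => PySem.Str.startswith e p) with
    | some e =>
      obtain ⟨hpe, as, bs, rfl, hprev⟩ := List.find?_eq_some_iff_append.mp hf
      have hpe' : PySem.Chars.startswith e.toList p.toList = true := by simpa using hpe
      refine (min?_first (rankB (p :: t)) as e bs ?_ ?_).symm
      · intro x hx
        have hx' : PySem.Chars.startswith x.toList p.toList = false := by
          simpa using hprev x hx
        simp [rankB, hpe', hx']
      · intro x _; simp [rankB, hpe']
    | none =>
      have hnone : ∀ x ∈ pool, PySem.Chars.startswith x.toList p.toList = false := by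
        intro x hx
        simpa using List.find?_eq_none.mp hf x hx
      have hcongr : PySem.List.min? pool (rankB (p :: t))
          = PySem.List.min? pool (fun x => rankB t x + 1) := by
        refine min?_congr_mem pool _ _ ?_
        intro x hx; simp [rankB, hnone x hx]
      rw [hcongr, min?_shift pool (rankB t)]
      exact ih

lemma pvPool_ne_nil (emails : List String) (domain : Option String)
    (h : emails ≠ []) : pvPool emails domain ≠ [] := by
  cases domain with
  | none => exact h
  | some d =>
    show (if d.toList = [] then emails
      else if (emails.filter
          (fun e => PySem.Chars.endswith e.toList ('@' :: PySem.Chars.lower d.toList))).isEmpty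
        then emails
        else emails.filter
          (fun e => PySem.Chars.endswith e.toList ('@' :: PySem.Chars.lower d.toList))) ≠ []
    by_cases h1 : d.toList = []
    · rw [if_pos h1]; exact h
    · rw [if_neg h1]
      show (if (emails.filter
          (fun e => PySem.Chars.endswith e.toList ('@' :: PySem.Chars.lower d.toList))).isEmpty
        then emails
        else emails.filter
          (fun e => PySem.Chars.endswith e.toList ('@' :: PySem.Chars.lower d.toList))) ≠ []
      by_cases h2 : (emails.filter
          (fun e => PySem.Chars.endswith e.toList ('@' :: PySem.Chars.lower d.toList))).isEmpty
      · rw [if_pos h2]; exact h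
      · rw [if_neg h2]
        simpa [List.isEmpty_iff] using h2

-- ===== VERDICT (by name: the statement is the Claim_ definition above) =====
theorem prefer_generic_email_spec : Claim_equal_prefer_generic_email := by
  intro emails domain _
  unfold Spec_prefer_generic_email prefer_generic_email prefer_generic_email_alt
  cases he : emails.isEmpty with
  | true => simp
  | false =>
    have hne : emails ≠ [] := by simpa [List.isEmpty_iff] using he
    simp only [Bool.false_eq_true, if_false]
    exact loop_eq_min PREFERRED_PREFIXES (pvPool emails domain)
      (pvPool_ne_nil emails domain hne)
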